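-- pv_equiv track=rewrite | github.com/m-earle/Python-CS50-credit | dna.py | STRcount
-- ===== SOURCE A (Python) =====
-- def STRcount (s, checkseq):
--     precount = []
--     for n in range(len(s)):
--         freq = 0
--         for i in range(n, len(s), len(checkseq)):
--             j = i+len(checkseq)
--             if s[i:j] == checkseq:
--                freq = freq + 1
--             else:
--                 break
--         precount.append(freq)
--     maxcount = 0
--     for x in range(len(precount)):
--         if precount[x] > maxcount:
--             maxcount = precount[x]
--     return maxcount
-- ===== SOURCE B (Python) =====
-- def STRcount(s, checkseq):
--     k = len(checkseq)
--     n = len(s)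
--     if k == 0:
--         return 0
--     run = [0] * (n + 1)
--     best = 0
--     for i in range(n - 1, -1, -1):
--         if s.startswith(checkseq, i):
--             r = run[i+k] + 1
--         else:
--             r = 0
--         run[i] = r
--         if r > best:
--             best = r
--     return best
-- ===== Notes on version B (the rewrite author's own statement) =====
-- stated objective: faster
-- what changed: Replaces A's per-start rescan (for every start position, walk forward counting consecutive pattern matches) by a single right-to-left dynamic-programming pass run[i] = run[i+k] + 1 on an allocation-free startswith match, taking the maximum on the fly.
import Mathlib
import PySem

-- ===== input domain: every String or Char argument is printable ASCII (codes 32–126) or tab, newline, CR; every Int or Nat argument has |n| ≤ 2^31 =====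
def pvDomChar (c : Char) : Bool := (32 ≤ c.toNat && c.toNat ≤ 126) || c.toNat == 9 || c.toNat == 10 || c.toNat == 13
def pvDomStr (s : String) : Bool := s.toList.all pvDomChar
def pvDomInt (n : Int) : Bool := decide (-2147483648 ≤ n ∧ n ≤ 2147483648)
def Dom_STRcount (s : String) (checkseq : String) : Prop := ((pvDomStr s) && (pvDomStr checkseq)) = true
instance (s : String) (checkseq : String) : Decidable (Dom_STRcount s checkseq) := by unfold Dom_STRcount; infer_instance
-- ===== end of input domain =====

-- B replaces A's per-start rescan by one right-to-left DP pass (run[i] = run[i+k]+1 on match); return values proved equal.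

-- ===== PORT A =====
-- inner 'for i in range(n, len(s), len(checkseq)): … else: break' loop of A, as recursion over the range list
def pvLoopA (cs q : List Char) : List Int → Int → Int
  | [], freq => freq
  | i :: rest, freq =>
    if PySem.List.slice cs (some i) (some (i + (q.length : Int))) = q
    then pvLoopA cs q rest (freq + 1)
    else freq

def STRcount (s : String) (checkseq : String) : Int :=
  let cs := s.toList
  let q := checkseq.toList
  let precount := (PySem.List.pyRange 0 (cs.length : Int) 1).map
      (fun n => pvLoopA cs q (PySem.List.pyRange n (cs.length : Int) (q.length : Int)) 0)
  precount.foldl (fun maxcount x => if x > maxcount then x else maxcount) 0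

-- ===== PORT B =====
-- loop body of B: r = run[i+k]+1 on match else 0; run[i] = r; best = max(best, r).
-- 's.startswith(checkseq, i)' is ported exactly as the slice equality it denotes at the
-- nonnegative in-range i produced by the loop: s[i:i+k] == checkseq.
def pvStepB (cs q : List Char) (st : List Int × Int) (i : Int) : List Int × Int :=
  let r : Int := if PySem.List.slice cs (some i) (some (i + (q.length : Int))) = q
                 then PySem.List.pyGetD st.1 (i + (q.length : Int)) 0 + 1 else 0
  (PySem.List.pySetD st.1 i r, if r > st.2 then r else st.2)

def STRcount_alt (s : String) (checkseq : String) : Int :=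
  let cs := s.toList
  let q := checkseq.toList
  let k : Int := q.length
  let n : Int := cs.length
  if k = 0 then 0
  else
    ((PySem.List.pyRange (n - 1) (-1) (-1)).foldl (pvStepB cs q)
      (List.replicate (cs.length + 1) 0, 0)).2

-- ===== PRECONDITION & SPEC =====
-- Pre_ excludes exactly the inputs where A raises ValueError: checkseq == "" with non-empty s
-- (range() with step 0); A returns on every other input.
def Pre_STRcount (s : String) (checkseq : String) : Prop :=
  checkseq.toList ≠ [] ∨ s.toList = []
instance (s : String) (checkseq : String) : Decidable (Pre_STRcount s checkseq) := by
  unfold Pre_STRcount; infer_instance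

def pvWitness_STRcount : String × String := ("GTAGTAGTACC", "GTA")

def Spec_STRcount (s : String) (checkseq : String) (out : Int) : Prop := out = STRcount_alt s checkseq
instance (s : String) (checkseq : String) (out : Int) : Decidable (Spec_STRcount s checkseq out) := by
  unfold Spec_STRcount; infer_instance

-- ===== CLAIM (what is proved, stated in full; the proofs are below) =====
def Claim_equal_STRcount : Prop := ∀ (s : String) (checkseq : String), Dom_STRcount s checkseq → Pre_STRcount s checkseq → Spec_STRcount s checkseq (STRcount s checkseq)


-- ===== LEMMAS AND PROOFS =====

-- the run value: number of consecutive copies of q starting at i (fuel-indexed)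
def pvF (cs q : List Char) : Nat → Nat → Int
  | 0, _ => 0
  | f + 1, i => if (cs.drop i).take q.length = q then pvF cs q f (i + q.length) + 1 else 0

def pvFv (cs q : List Char) (i : Nat) : Int := pvF cs q (cs.length + 1) i

-- max of pvFv over [i, cs.length), floored at 0
def pvM (cs q : List Char) (i : Nat) : Int :=
  if i < cs.length then max (pvFv cs q i) (pvM cs q (i + 1)) else 0
termination_by cs.length - i

lemma pvMatch_bounds {cs q : List Char} {i : Nat} (hq : q ≠ [])
    (hm : (cs.drop i).take q.length = q) : i + q.length ≤ cs.length ∧ i < cs.length := by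
  have hl := congrArg List.length hm
  simp [List.length_take, List.length_drop] at hl
  have hq' : q.length ≠ 0 := by simpa using fun h => hq (List.eq_nil_of_length_eq_zero h)
  omega

lemma pvF_nonneg (cs q : List Char) : ∀ f i, 0 ≤ pvF cs q f i := by
  intro f
  induction f with
  | zero => intro i; simp [pvF]
  | succ f ih =>
    intro i
    simp only [pvF]
    split
    · have := ih (i + q.length); omega
    · omega

lemma pvF_zero_of_ge {cs q : List Char} (hq : q ≠ []) {i : Nat} (hi : cs.length ≤ i) :
    ∀ f, pvF cs q f i = 0 := by
  intro f
  cases f with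
  | zero => rfl
  | succ f =>
    simp only [pvF]
    split
    · rename_i hm
      exact absurd (pvMatch_bounds hq hm).2 (by omega)
    · rfl

lemma pvF_stab {cs q : List Char} (hq : q ≠ []) :
    ∀ f1 f2 i, cs.length < f1 + i → cs.length < f2 + i → pvF cs q f1 i = pvF cs q f2 i := by
  intro f1
  induction f1 with
  | zero =>
    intro f2 i h1 _
    rw [pvF, pvF_zero_of_ge hq (by omega)]
  | succ f1 ih =>
    intro f2 i h1 h2
    cases f2 with
    | zero => rw [pvF, pvF_zero_of_ge hq (by omega)]
    | succ f2 =>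
      simp only [pvF]
      split
      · rename_i hm
        have hk : q.length ≠ 0 := by simpa using fun h => hq (List.eq_nil_of_length_eq_zero h)
        rw [ih f2 (i + q.length) (by omega) (by omega)]
      · rfl

lemma pvFv_unfold {cs q : List Char} (hq : q ≠ []) (i : Nat) :
    pvFv cs q i = if (cs.drop i).take q.length = q then pvFv cs q (i + q.length) + 1 else 0 := by
  have hk : q.length ≠ 0 := by simpa using fun h => hq (List.eq_nil_of_length_eq_zero h)
  unfold pvFv
  rw [pvF]
  split
  · rw [pvF_stab hq cs.length (cs.length + 1) (i + q.length) (by omega) (by omega)]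
  · rfl

lemma pvFv_nonneg (cs q : List Char) (i : Nat) : 0 ≤ pvFv cs q i := pvF_nonneg cs q _ i

lemma pvM_nonneg (cs q : List Char) : ∀ m i, cs.length - i ≤ m → 0 ≤ pvM cs q i := by
  intro m
  induction m with
  | zero => intro i h; rw [pvM]; simp [show ¬ i < cs.length by omega]
  | succ m ih =>
    intro i h
    rw [pvM]
    split
    · exact le_trans (pvFv_nonneg cs q i) (le_max_left _ _)
    · omega

-- cons form of range(a, b, s) for any positive step
lemma pvRange_pos_cons (a b s : Int) (hs : 0 < s) (h : a < b) :
    PySem.List.pyRange a b s = a :: PySem.List.pyRange (a + s) b s := by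
  rw [PySem.List.pyRange_of_pos a b hs, PySem.List.pyRange_of_pos (a + s) b hs]
  have hnn : 0 ≤ (b - a - 1) / s := Int.ediv_nonneg (by omega) (by omega)
  have hsum : (b - a + s - 1) / s = (b - a - 1) / s + 1 := by
    rw [show b - a + s - 1 = b - a - 1 + 1 * s by ring]
    simpa using Int.add_mul_ediv_right (b - a - 1) 1 (show s ≠ 0 by omega)
  by_cases hab : a + s < b
  · have hm : (if a < b then ((b - a + s - 1) / s).toNat else 0)
        = ((b - (a + s) + s - 1) / s).toNat + 1 := by
      simp only [if_pos h]
      have : b - (a + s) + s - 1 = b - a - 1 := by ring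
      rw [this, hsum]
      omega
    rw [hm, if_pos hab, List.range_succ_eq_map]
    simp [Function.comp, List.map_map]
    intro k hk
    ring
  · have hz : (b - a - 1) / s = 0 := Int.ediv_eq_zero_of_lt (by omega) (by omega)
    have hm : (if a < b then ((b - a + s - 1) / s).toNat else 0) = 1 := by
      simp only [if_pos h, hsum, hz]
      rfl
    rw [hm, if_neg (by omega)]
    simp

lemma pvRange_pos_nil (a b s : Int) (hs : 0 < s) (h : b ≤ a) :
    PySem.List.pyRange a b s = [] := by
  rw [PySem.List.pyRange_of_pos a b hs]
  simp [show ¬ a < b by omega]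

-- A's inner loop computes pvFv
lemma pvLoopA_eq {cs q : List Char} (hq : q ≠ []) :
    ∀ (m i : Nat) (acc : Int), cs.length - i ≤ m →
      pvLoopA cs q (PySem.List.pyRange (i : Int) (cs.length : Int) (q.length : Int)) acc
        = acc + pvFv cs q i := by
  have hk : q.length ≠ 0 := by simpa using fun h => hq (List.eq_nil_of_length_eq_zero h)
  intro m
  induction m with
  | zero =>
    intro i acc h
    rw [pvRange_pos_nil _ _ _ (by exact_mod_cast Nat.pos_of_ne_zero hk) (by exact_mod_cast (by omega : cs.length ≤ i))]
    rw [pvLoopA, pvFv, pvF_zero_of_ge hq (by omega)]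
    ring
  | succ m ih =>
    intro i acc h
    by_cases hi : cs.length ≤ i
    · rw [pvRange_pos_nil _ _ _ (by exact_mod_cast Nat.pos_of_ne_zero hk) (by exact_mod_cast hi)]
      rw [pvLoopA, pvFv, pvF_zero_of_ge hq hi]
      ring
    · rw [pvRange_pos_cons _ _ _ (by exact_mod_cast Nat.pos_of_ne_zero hk) (by exact_mod_cast (by omega : i < cs.length))]
      rw [pvLoopA]
      simp only [PySem.List.slice_natCast_add cs i q.length]
      rw [pvFv_unfold hq i]
      split
      · rename_i hm
        have : ((i : Int) + (q.length : Int)) = ((i + q.length : Nat) : Int) := by push_cast; ring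
        rw [this, ih (i + q.length) (acc + 1) (by omega)]
        ring
      · ring

-- A's max loop over [pvFv i, …, pvFv (n-1)] computes max acc (pvM i)
lemma pvMaxFold {cs q : List Char} :
    ∀ (m i : Nat) (acc : Int), cs.length - i ≤ m → 0 ≤ acc →
      List.foldl (fun maxcount x => if x > maxcount then x else maxcount) acc
          ((List.range' i (cs.length - i)).map (pvFv cs q))
        = max acc (pvM cs q i) := by
  intro m
  induction m with
  | zero =>
    intro i acc h hacc
    rw [show cs.length - i = 0 by omega]
    rw [pvM]
    simp [show ¬ i < cs.length by omega, max_eq_left hacc]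
  | succ m ih =>
    intro i acc h hacc
    by_cases hi : cs.length ≤ i
    · rw [show cs.length - i = 0 by omega]
      rw [pvM]
      simp [show ¬ i < cs.length by omega, max_eq_left hacc]
    · rw [show cs.length - i = (cs.length - (i + 1)) + 1 by omega, List.range'_succ, List.map_cons,
          List.foldl_cons]
      have hstep : (if pvFv cs q i > acc then pvFv cs q i else acc) = max acc (pvFv cs q i) := by
        rcases max_cases acc (pvFv cs q i) with ⟨h1, h2⟩ | ⟨h1, h2⟩ <;> rw [h1] <;> split <;> omega
      rw [hstep, ih (i + 1) _ (by omega) (le_trans hacc (le_max_left _ _))]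
      conv_rhs => rw [pvM]
      rw [if_pos (show i < cs.length by omega), max_assoc]

-- one iteration of B's loop at index j, under the invariant
lemma pvStepB_eq {cs q : List Char} (hq : q ≠ []) (j : Nat) (run : List Int) (best : Int)
    (_hj : j < cs.length) (_hlen : run.length = cs.length + 1)
    (hrun : ∀ t : Nat, j < t → PySem.List.pyGetD run (t : Int) 0 = pvFv cs q t) :
    pvStepB cs q (run, best) (j : Int)
      = (PySem.List.pySetD run (j : Int) (pvFv cs q j),
         if pvFv cs q j > best then pvFv cs q j else best) := by
  have hk : q.length ≠ 0 := by simpa using fun h => hq (List.eq_nil_of_length_eq_zero h)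
  unfold pvStepB
  simp only [PySem.List.slice_natCast_add cs j q.length]
  rw [pvFv_unfold hq j]
  split
  · rename_i hm
    have hcast : ((j : Int) + (q.length : Int)) = ((j + q.length : Nat) : Int) := by push_cast; ring
    rw [hcast, hrun (j + q.length) (by omega)]
  · rfl

-- B's countdown fold computes pvM 0
lemma pvBfold {cs q : List Char} (hq : q ≠ []) :
    ∀ (i : Nat) (run : List Int) (best : Int), i < cs.length → run.length = cs.length + 1 →
      (∀ t : Nat, i < t → PySem.List.pyGetD run (t : Int) 0 = pvFv cs q t) →
      best = pvM cs q (i + 1) →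
      ((PySem.List.pyRange (i : Int) (-1) (-1)).foldl (pvStepB cs q) (run, best)).2
        = pvM cs q 0 := by
  intro i
  induction i with
  | zero =>
    intro run best hi hlen hrun hbest
    rw [PySem.List.pyRange_neg_one_cons (by omega : (-1 : Int) < (0 : Nat))]
    rw [show ((0 : Nat) : Int) - 1 = -1 by omega, PySem.List.pyRange_neg_one_eq_nil (le_refl _)]
    rw [List.foldl_cons, List.foldl_nil]
    rw [pvStepB_eq hq 0 run best hi hlen hrun]
    have hstep : (if pvFv cs q 0 > best then pvFv cs q 0 else best) = max best (pvFv cs q 0) := by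
      rcases max_cases best (pvFv cs q 0) with ⟨h1, h2⟩ | ⟨h1, h2⟩ <;> rw [h1] <;> split <;> omega
    rw [hstep, hbest]
    conv_rhs => rw [pvM]
    rw [if_pos hi, max_comm]
  | succ i ih =>
    intro run best hi hlen hrun hbest
    rw [PySem.List.pyRange_neg_one_cons (by omega : (-1 : Int) < ((i + 1 : Nat) : Int))]
    rw [show ((i + 1 : Nat) : Int) - 1 = (i : Int) by push_cast; ring]
    rw [List.foldl_cons]
    rw [pvStepB_eq hq (i + 1) run best hi hlen hrun]
    have hstep : (if pvFv cs q (i + 1) > best then pvFv cs q (i + 1) else best)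
        = max best (pvFv cs q (i + 1)) := by
      rcases max_cases best (pvFv cs q (i + 1)) with ⟨h1, h2⟩ | ⟨h1, h2⟩ <;> rw [h1] <;> split <;> omega
    rw [hstep]
    apply ih
    · omega
    · simpa using hlen
    · intro t ht
      rcases Nat.lt_or_ge (i + 1) t with h' | h'
      · rw [show ((t : Nat) : Int) = ((t : Nat) : Int) from rfl]
        rw [PySem.List.pyGetD_pySetD_natCast run (i + 1) t _ _ (by omega)]
        rw [if_neg (by omega)]
        exact hrun t h'
      · have : t = i + 1 := by omega
        subst this
        rw [PySem.List.pyGetD_pySetD_natCast run (i + 1) (i + 1) _ _ (by omega)]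
        simp
    · rw [hbest]
      conv_rhs => rw [pvM]
      rw [if_pos hi, max_comm]

-- A equals pvM 0 (pattern non-empty)
lemma pvA_eq {cs q : List Char} (hq : q ≠ []) :
    (let precount := (PySem.List.pyRange 0 (cs.length : Int) 1).map
        (fun n => pvLoopA cs q (PySem.List.pyRange n (cs.length : Int) (q.length : Int)) 0);
     precount.foldl (fun maxcount x => if x > maxcount then x else maxcount) 0)
      = pvM cs q 0 := by
  simp only
  rw [PySem.List.pyRange_one 0 (cs.length : Int)]
  simp only [List.map_map]
  have hfun : ((fun n => pvLoopA cs q (PySem.List.pyRange n (cs.length : Int) (q.length : Int)) 0)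
        ∘ fun k : Nat => (0 : Int) + (k : Int)) = fun k : Nat => pvFv cs q k := by
    funext t
    simp only [Function.comp]
    rw [zero_add, pvLoopA_eq hq cs.length t 0 (by omega)]
    ring
  rw [hfun]
  rw [show ((cs.length : Int) - 0).toNat = cs.length by omega]
  rw [List.range_eq_range']
  have := pvMaxFold (cs := cs) (q := q) cs.length 0 0 (by omega) (le_refl 0)
  rw [show cs.length - 0 = cs.length by omega] at this
  rw [this]
  exact max_eq_right (pvM_nonneg cs q cs.length 0 (by omega))

-- ===== VERDICT (by name: the statement is the Claim_ definition above) =====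
theorem STRcount_spec : Claim_equal_STRcount := by
  intro s checkseq _ hpre
  unfold Spec_STRcount STRcount STRcount_alt
  simp only
  by_cases hqe : checkseq.toList = []
  · rcases hpre with h | h
    · exact absurd hqe h
    · rw [hqe, h]
      simp [pvRange_pos_nil 0 0 1 (by omega) (le_refl (0 : Int))]
  · rw [if_neg (show ¬ ((checkseq.toList.length : Int) = 0) by
        simpa [List.length_eq_zero_iff] using hqe)]
    rw [pvA_eq hqe]
    by_cases hn : s.toList.length = 0
    · rw [hn, show ((0 : Nat) : Int) - 1 = -1 by omega,
        PySem.List.pyRange_neg_one_eq_nil (le_refl _), List.foldl_nil]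
      rw [pvM]
      simp [hn]
    · rw [show ((s.toList.length : Int)) - 1 = ((s.toList.length - 1 : Nat) : Int) by omega]
      rw [pvBfold hqe (s.toList.length - 1) (List.replicate (s.toList.length + 1) 0) 0 (by omega)
        (by simp)
        (by
          intro t ht
          rw [PySem.List.pyGetD_natCast]
          rw [pvFv, pvF_zero_of_ge hqe (by omega)]
          simp [List.getD_eq_getElem?_getD])
        (by rw [show s.toList.length - 1 + 1 = s.toList.length by omega, pvM]; simp)]
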